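-- pv_equiv track=rewrite | github.com/tmanuszak/ProjectEuler | P054.py | hcheck
-- ===== SOURCE A (Python) =====
-- def hcheck(h1, h2):
--     h1[0].sort()
--     h2[0].sort()
--     if len(h1[0]) > 0:
--         if h1[0][-1] == h2[0][-1]:
--             h1[0] = h1[0][0:-1]
--             h2[0] = h2[0][0:-1]
--             return hcheck(h1, h2)
--         elif h1[0][-1] > h2[0][-1]:
--             return 1
--         elif h2[0][-1] > h1[0][-1]:
--             return 2
--     return 0
-- ===== SOURCE B (Python) =====
-- def hcheck(h1, h2):
--     # Return-value re-implementation: sort each hand descending once and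
--     # compare positionally.  (Unlike A, it does not mutate h1[0]/h2[0].)
--     a = sorted(h1[0], reverse=True)
--     b = sorted(h2[0], reverse=True)
--     for x, y in zip(a, b):
--         if x > y:
--             return 1
--         if y > x:
--             return 2
--     return 0
-- ===== Notes on version B (the rewrite author's own statement) =====
-- stated objective: simpler
-- what changed: A re-sorts both hands and recursively pops equal maxima; B sorts each hand descending once and does a single positional scan over the zipped pair, with no recursion and no repeated sorting (return value only: B does not mutate h1[0]/h2[0]).
import Mathlib
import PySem

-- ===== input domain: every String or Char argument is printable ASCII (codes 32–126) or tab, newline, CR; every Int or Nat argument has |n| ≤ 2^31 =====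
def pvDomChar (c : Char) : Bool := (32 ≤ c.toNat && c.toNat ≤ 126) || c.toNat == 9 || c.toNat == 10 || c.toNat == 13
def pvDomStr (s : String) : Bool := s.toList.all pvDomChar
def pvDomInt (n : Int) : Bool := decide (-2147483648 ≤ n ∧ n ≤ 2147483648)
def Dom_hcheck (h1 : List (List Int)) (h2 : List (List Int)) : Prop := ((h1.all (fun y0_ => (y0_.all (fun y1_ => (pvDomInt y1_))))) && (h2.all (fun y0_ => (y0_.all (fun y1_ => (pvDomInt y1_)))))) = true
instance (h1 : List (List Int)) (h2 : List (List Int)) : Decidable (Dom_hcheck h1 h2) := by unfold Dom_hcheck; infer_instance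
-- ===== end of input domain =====

-- B replaces A's recursive re-sort-and-pop with one descending sort per hand and a single
-- positional scan (simpler); equivalence is about the RETURN VALUE only — A mutates
-- h1[0]/h2[0] in place (sorts and truncates them), B does not.


-- ===== PORT A =====
-- A's in-place state (h1[0], h2[0]) becomes the two recursion arguments; the re-sort
-- at every call is kept.  pyGetD/headD defaults are only reached where Python raises
-- (excluded by Pre_hcheck).
def hcheckGo (a b : List Int) : Int :=
  let a' := PySem.List.sorted a (fun x => x) false      -- h1[0].sort()
  let b' := PySem.List.sorted b (fun x => x) false      -- h2[0].sort()
  if h : 0 < a'.length then                              -- if len(h1[0]) > 0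
    if PySem.List.pyGetD a' (-1) 0 = PySem.List.pyGetD b' (-1) 0 then
      hcheckGo (PySem.List.slice a' (some 0) (some (-1)))
               (PySem.List.slice b' (some 0) (some (-1)))
    else if PySem.List.pyGetD a' (-1) 0 > PySem.List.pyGetD b' (-1) 0 then 1
    else if PySem.List.pyGetD b' (-1) 0 > PySem.List.pyGetD a' (-1) 0 then 2
    else 0
  else 0
termination_by a.length
decreasing_by
  simp only [a', b', PySem.List.slice_zero_start, PySem.List.slice_to_neg_one] at *
  have hlen : (PySem.List.sorted a (fun x => x) false).length = a.length := PySem.List.length_sorted ..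
  simp only [List.length_dropLast]
  omega

def hcheck (h1 : List (List Int)) (h2 : List (List Int)) : Int :=
  hcheckGo (h1.headD []) (h2.headD [])

-- ===== PORT B =====
-- the early-return for-loop over zip(a, b)
def altScan : List (Int × Int) → Int
  | [] => 0
  | (x, y) :: rest => if x > y then 1 else if y > x then 2 else altScan rest

def hcheck_alt (h1 : List (List Int)) (h2 : List (List Int)) : Int :=
  let a := PySem.List.sorted (h1.headD []) (fun x => x) true   -- sorted(h1[0], reverse=True)
  let b := PySem.List.sorted (h2.headD []) (fun x => x) true
  altScan (a.zip b)

-- ===== PRECONDITION & SPEC =====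
-- Pre_ excludes exactly where A raises IndexError: empty h1/h2 (h1[0]/h2[0] fails), and the
-- case where the sorted h2[0] is a strictly shorter top-suffix of the sorted h1[0] (all
-- max-comparisons tie until h2[0] is exhausted, then h2[0][-1] fails; B returns 0 there).
def Pre_hcheck (h1 : List (List Int)) (h2 : List (List Int)) : Prop :=
  h1 ≠ [] ∧ h2 ≠ [] ∧
  ¬ ((h2.headD []).length < (h1.headD []).length ∧
      (PySem.List.sorted (h1.headD []) (fun x => x) false).drop
        ((h1.headD []).length - (h2.headD []).length)
      = PySem.List.sorted (h2.headD []) (fun x => x) false)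
instance (h1 : List (List Int)) (h2 : List (List Int)) : Decidable (Pre_hcheck h1 h2) := by
  unfold Pre_hcheck; infer_instance

def pvWitness_hcheck : List (List Int) × List (List Int) := ([[3, 1]], [[2, 2]])

def Spec_hcheck (h1 : List (List Int)) (h2 : List (List Int)) (out : Int) : Prop := out = hcheck_alt h1 h2
instance (h1 : List (List Int)) (h2 : List (List Int)) (out : Int) : Decidable (Spec_hcheck h1 h2 out) := by unfold Spec_hcheck; infer_instance

-- ===== CLAIM (what is proved, stated in full; the proofs are below) =====
def Claim_equal_hcheck : Prop := ∀ (h1 : List (List Int)) (h2 : List (List Int)), Dom_hcheck h1 h2 → Pre_hcheck h1 h2 → Spec_hcheck h1 h2 (hcheck h1 h2)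

-- ===== LEMMAS AND PROOFS =====

lemma sorted_true_eq_reverse (xs : List Int) :
    PySem.List.sorted xs (fun x => x) true = (PySem.List.sorted xs (fun x => x) false).reverse := by
  have h : (PySem.List.sorted xs (fun x => x) true).reverse = PySem.List.sorted xs (fun x => x) false := by
    apply PySem.List.eq_of_perm_of_pairwise_le_of_injective (fun x : Int => x) (fun a b h => h)
    · have p1 : (PySem.List.sorted xs (fun x => x) true).Perm xs := PySem.List.sorted_perm ..
      have p2 : (PySem.List.sorted xs (fun x => x) false).Perm xs := PySem.List.sorted_perm ..
      exact ((PySem.List.sorted xs (fun x => x) true).reverse_perm.trans p1).trans p2.symm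
    · exact List.pairwise_reverse.mpr (PySem.List.sorted_pairwise_rev ..)
    · exact PySem.List.sorted_pairwise ..
  rw [← h, List.reverse_reverse]

lemma pyGetD_concat (l : List Int) (x : Int) : PySem.List.pyGetD (l ++ [x]) (-1) 0 = x := by
  simp [PySem.List.pyGetD, PySem.List.pyGet?_neg_one]

lemma go_eq (n : Nat) : ∀ (a b : List Int), a.length ≤ n →
    ¬ (b.length < a.length ∧
      (PySem.List.sorted a (fun x => x) false).drop (a.length - b.length)
        = PySem.List.sorted b (fun x => x) false) →
    hcheckGo a b =
      altScan ((PySem.List.sorted a (fun x => x) false).reverse.zip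
               ((PySem.List.sorted b (fun x => x) false).reverse)) := by
  induction n with
  | zero =>
    intro a b hn hok
    have ha : a = [] := List.eq_nil_of_length_eq_zero (Nat.le_zero.mp hn)
    subst ha
    rw [hcheckGo]
    simp [PySem.List.sorted, altScan]
  | succ n ih =>
    intro a b hn hok
    have hSlen : (PySem.List.sorted a (fun x => x) false).length = a.length :=
      PySem.List.length_sorted ..
    have hTlen : (PySem.List.sorted b (fun x => x) false).length = b.length :=
      PySem.List.length_sorted ..
    rcases (PySem.List.sorted a (fun x => x) false).eq_nil_or_concat' with hS | ⟨S₀, x, hS⟩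
    · -- empty hand: hcheckGo returns 0, scan of empty zip is 0
      rw [hcheckGo]
      simp only [hS] at hSlen ⊢
      rw [dif_neg (by simp)]
      simp [altScan]
    · rcases (PySem.List.sorted b (fun x => x) false).eq_nil_or_concat' with hT | ⟨T₀, y, hT⟩
      · -- A would raise: excluded by hok
        exfalso
        apply hok
        have hb : b.length = 0 := by rw [← hTlen, hT]; rfl
        have hal : 0 < a.length := by rw [← hSlen, hS]; simp
        refine ⟨by omega, ?_⟩
        rw [hb, hT, Nat.sub_zero, ← hSlen, List.drop_length]
      · -- both hands end in x, y
        have hSp : (PySem.List.sorted a (fun x => x) false).Pairwise (· ≤ ·) :=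
          PySem.List.sorted_pairwise ..
        have hTp : (PySem.List.sorted b (fun x => x) false).Pairwise (· ≤ ·) :=
          PySem.List.sorted_pairwise ..
        rw [hS] at hSp; rw [hT] at hTp
        have hS₀p : S₀.Pairwise (· ≤ ·) := (List.pairwise_append.mp hSp).1
        have hT₀p : T₀.Pairwise (· ≤ ·) := (List.pairwise_append.mp hTp).1
        have hS₀s : PySem.List.sorted S₀ (fun x => x) false = S₀ :=
          PySem.List.sorted_eq_self_of_pairwise S₀ (fun x => x) hS₀p
        have hT₀s : PySem.List.sorted T₀ (fun x => x) false = T₀ :=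
          PySem.List.sorted_eq_self_of_pairwise T₀ (fun x => x) hT₀p
        rw [hcheckGo]
        simp only [hS, hT]
        rw [dif_pos (by simp)]
        rw [pyGetD_concat, pyGetD_concat]
        rw [PySem.List.slice_zero_start, PySem.List.slice_zero_start,
            PySem.List.slice_to_neg_one, PySem.List.slice_to_neg_one,
            List.dropLast_concat, List.dropLast_concat]
        simp only [List.reverse_concat, List.zip_cons_cons, altScan]
        by_cases hxy : x = y
        · subst hxy
          rw [if_pos rfl, if_neg (lt_irrefl x), if_neg (lt_irrefl x)]
          have hok' : ¬ (T₀.length < S₀.length ∧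
              (PySem.List.sorted S₀ (fun x => x) false).drop (S₀.length - T₀.length)
                = PySem.List.sorted T₀ (fun x => x) false) := by
            rintro ⟨hl, hd⟩
            apply hok
            have ha' : a.length = S₀.length + 1 := by rw [← hSlen, hS]; simp
            have hb' : b.length = T₀.length + 1 := by rw [← hTlen, hT]; simp
            refine ⟨by omega, ?_⟩
            rw [hS, hT, ha', hb']
            have hk : S₀.length + 1 - (T₀.length + 1) = S₀.length - T₀.length := by omega
            rw [hk, List.drop_append_of_le_length (by omega)]
            rw [hS₀s, hT₀s] at hd
            rw [hd]
          have ha' : a.length = S₀.length + 1 := by rw [← hSlen, hS]; simp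
          have := ih S₀ T₀ (by omega) hok'
          rw [this, hS₀s, hT₀s]
        · rcases lt_or_gt_of_ne hxy with h | h
          · rw [if_neg hxy, if_neg (by omega), if_pos (by omega), if_neg (by omega), if_pos (by omega)]
          · rw [if_neg hxy, if_pos (by omega), if_pos (by omega)]

-- ===== VERDICT (by name: the statement is the Claim_ definition above) =====
theorem hcheck_spec : Claim_equal_hcheck := by
  intro h1 h2 _ hpre
  obtain ⟨-, -, hok⟩ := hpre
  show hcheck h1 h2 = hcheck_alt h1 h2
  unfold hcheck hcheck_alt
  rw [go_eq (h1.headD []).length _ _ le_rfl hok, sorted_true_eq_reverse, sorted_true_eq_reverse]
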